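-- pv_equiv track=rewrite | github.com/marceloarenassaavedra/prop_xai | aaai25/probs.py | gen_completions
-- ===== SOURCE A (Python) =====
-- def gen_completions(y):
--     def backtrack(index, current):
--         if index == len(y):
--             result.append(current[:])
--             return
--
--         if y[index] == 1 or y[index] == 0:
--             current.append(y[index])
--             backtrack(index + 1, current)
--             current.pop()
--         else:  # y[index] == -1
--             for val in [0, 1]:
--                 current.append(val)
--                 backtrack(index + 1, current)
--                 current.pop()
--
--     result = []
--     backtrack(0, [])
--     return result
-- ===== SOURCE B (Python) =====
-- def gen_completions(y):
--     result = [[]]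
--     for v in y:
--         if v == 0 or v == 1:
--             result = [r + [v] for r in result]
--         else:
--             result = [r + [b] for r in result for b in (0, 1)]
--     return result
-- ===== Notes on version B (the rewrite author's own statement) =====
-- stated objective: idiomatic
-- what changed: Replaces the recursive backtracking with a shared mutable list by a left-to-right iterative build that extends every partial completion at each entry.
import Mathlib
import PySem

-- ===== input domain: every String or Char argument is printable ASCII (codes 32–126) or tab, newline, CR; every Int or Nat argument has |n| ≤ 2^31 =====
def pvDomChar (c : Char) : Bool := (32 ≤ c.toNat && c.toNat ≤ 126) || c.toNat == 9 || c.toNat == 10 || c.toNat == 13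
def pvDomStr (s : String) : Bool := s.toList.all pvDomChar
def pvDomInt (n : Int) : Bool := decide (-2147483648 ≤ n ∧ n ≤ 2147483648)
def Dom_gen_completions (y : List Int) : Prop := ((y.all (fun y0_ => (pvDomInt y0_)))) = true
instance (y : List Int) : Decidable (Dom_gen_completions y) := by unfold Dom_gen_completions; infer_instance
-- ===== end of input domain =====

-- B replaces the recursive backtracking over a shared mutable list by an iterative
-- left-to-right build extending every partial completion at each entry (idiomatic).

-- ===== PORT A =====
-- backtrack(index, current): returns the list of completions it would append to `result`.
-- The `none` branch of pyGet? (IndexError) is unreachable from index 0.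
def gen_completions.backtrack (y : List Int) (index : Nat) (current : List Int) :
    List (List Int) :=
  if _h : index = y.length then [current]
  else
    match h2 : PySem.List.pyGet? y (index : Int) with
    | none => []
    | some v =>
      if v = 1 ∨ v = 0 then
        gen_completions.backtrack y (index + 1) (current ++ [v])
      else
        gen_completions.backtrack y (index + 1) (current ++ [0]) ++
          gen_completions.backtrack y (index + 1) (current ++ [1])
termination_by y.length - index
decreasing_by
  all_goals
    simp only [PySem.List.pyGet?_natCast] at h2
    obtain ⟨hlt, -⟩ := List.getElem?_eq_some_iff.mp h2
    omega

def gen_completions (y : List Int) : List (List Int) :=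
  gen_completions.backtrack y 0 []

-- ===== PORT B =====
def gen_completions_alt (y : List Int) : List (List Int) :=
  y.foldl
    (fun result v =>
      if v = 0 ∨ v = 1 then result.map (fun r => r ++ [v])
      else result.flatMap (fun r => [0, 1].map (fun b => r ++ [b])))
    [[]]

-- ===== PRECONDITION & SPEC =====
def Spec_gen_completions (y : List Int) (out : List (List Int)) : Prop := out = gen_completions_alt y
instance (y : List Int) (out : List (List Int)) : Decidable (Spec_gen_completions y out) := by unfold Spec_gen_completions; infer_instance

-- ===== CLAIM (what is proved, stated in full; the proofs are below) =====
def Claim_equal_gen_completions : Prop := ∀ (y : List Int), Dom_gen_completions y → Spec_gen_completions y (gen_completions y)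

-- ===== LEMMAS AND PROOFS =====

-- reference recursion over the suffix of y
def pvComp : List Int → List (List Int)
  | [] => [[]]
  | v :: t =>
    if v = 1 ∨ v = 0 then (pvComp t).map (fun r => v :: r)
    else (pvComp t).map (fun r => (0:Int) :: r) ++ (pvComp t).map (fun r => (1:Int) :: r)

theorem pvBacktrack_eq (y : List Int) (index : Nat) (current : List Int)
    (hle : index ≤ y.length) :
    gen_completions.backtrack y index current
      = (pvComp (y.drop index)).map (fun r => current ++ r) := by
  by_cases h : index = y.length
  · subst h
    rw [gen_completions.backtrack]
    simp [pvComp]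
  · have hlt : index < y.length := lt_of_le_of_ne hle h
    rw [gen_completions.backtrack]
    have hget : PySem.List.pyGet? y (index : Int) = some y[index] := by
      simp [PySem.List.pyGet?_natCast, List.getElem?_eq_getElem hlt]
    have hdrop : y.drop index = y[index] :: y.drop (index + 1) :=
      List.drop_eq_getElem_cons hlt
    rw [dif_neg h, hget]
    have ih0 := pvBacktrack_eq y (index + 1) (current ++ [(0:Int)]) (by omega)
    have ih1 := pvBacktrack_eq y (index + 1) (current ++ [(1:Int)]) (by omega)
    have ihv := pvBacktrack_eq y (index + 1) (current ++ [y[index]]) (by omega)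
    split
    · rename_i heq; exact absurd heq (by simp)
    · rename_i v heq
      injection heq with hveq
      subst hveq
      by_cases hv : y[index] = 1 ∨ y[index] = 0
      · rw [if_pos hv, ihv, hdrop]
        simp [pvComp, hv, Function.comp_def]
      · rw [if_neg hv, ih0, ih1, hdrop]
        simp [pvComp, hv, Function.comp_def]
termination_by y.length - index

theorem pvFoldl_eq (l : List Int) (acc : List (List Int)) :
    l.foldl
      (fun result v =>
        if v = 0 ∨ v = 1 then result.map (fun r => r ++ [v])
        else result.flatMap (fun r => [0, 1].map (fun b => r ++ [b]))) acc
      = acc.flatMap (fun r => (pvComp l).map (fun s => r ++ s)) := by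
  induction l generalizing acc with
  | nil => simp [pvComp]
  | cons v t ih =>
    simp only [List.foldl_cons, ih]
    by_cases hv : v = 0 ∨ v = 1
    · have hv' : v = 1 ∨ v = 0 := hv.symm
      rw [if_pos hv]
      simp [pvComp, hv', List.flatMap_map, Function.comp_def]
    · have hv' : ¬ (v = 1 ∨ v = 0) := fun h => hv h.symm
      rw [if_neg hv]
      simp [pvComp, hv', List.flatMap_assoc, Function.comp_def,
        List.append_assoc]

-- ===== VERDICT (by name: the statement is the Claim_ definition above) =====
theorem gen_completions_spec : Claim_equal_gen_completions := by
  intro y _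
  unfold Spec_gen_completions gen_completions gen_completions_alt
  rw [pvBacktrack_eq y 0 [] (Nat.zero_le _), pvFoldl_eq]
  simp
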